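-- pv_equiv track=rewrite | github.com/gboxo/Interp_Hackathon | GA.py | can_reconstruct
-- ===== SOURCE A (Python) =====
-- def can_reconstruct(text, template):
--     """Check if the text can be reconstructed using the template."""
--     text_words = text.split()
--     template_words = template.split()
--
--     # Pointer for text words
--     text_index = 0
--     text_length = len(text_words)
--
--     for word in template_words:
--         if word == "[Dummy]":
--             # Skip the [Dummy] and allow any number of text words to match
--             continue
--
--         # Move the text_index to find the current word in the text
--         while text_index < text_length and text_words[text_index] != word:
--             text_index += 1
--
--         # If we reach the end of text or can't find the word, return False
--         if text_index == text_length: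
--             return False
--
--         # Move to the next word in text for the next iteration
--         text_index += 1
--
--     return True
-- ===== SOURCE B (Python) =====
-- def can_reconstruct(text, template):
--     """Check if the text can be reconstructed using the template."""
--     # Inverted index: word -> sorted list of its positions in the text.
--     positions = {}
--     for idx, w in enumerate(text.split()):
--         positions.setdefault(w, []).append(idx)
--
--     cur = 0
--     for w in template.split():
--         if w == "[Dummy]":
--             continue
--         occ = positions.get(w)
--         if occ is None:
--             return False
--         # binary search: first position in occ that is >= cur
--         lo, hi = 0, len(occ)
--         while lo < hi:
--             mid = (lo + hi) // 2
--             if occ[mid] < cur: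
--                 lo = mid + 1
--             else:
--                 hi = mid
--         if lo == len(occ):
--             return False
--         cur = occ[lo] + 1
--     return True
-- ===== Notes on version B (the rewrite author's own statement) =====
-- stated objective: alternative
-- what changed: B replaces A's merged two-pointer scan by an inverted index: it builds a dict mapping each text word to the sorted list of its positions, then for each non-[Dummy] template word binary-searches that list for the first position >= a cursor; A's inner while-scan over text words disappears.
import Mathlib
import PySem

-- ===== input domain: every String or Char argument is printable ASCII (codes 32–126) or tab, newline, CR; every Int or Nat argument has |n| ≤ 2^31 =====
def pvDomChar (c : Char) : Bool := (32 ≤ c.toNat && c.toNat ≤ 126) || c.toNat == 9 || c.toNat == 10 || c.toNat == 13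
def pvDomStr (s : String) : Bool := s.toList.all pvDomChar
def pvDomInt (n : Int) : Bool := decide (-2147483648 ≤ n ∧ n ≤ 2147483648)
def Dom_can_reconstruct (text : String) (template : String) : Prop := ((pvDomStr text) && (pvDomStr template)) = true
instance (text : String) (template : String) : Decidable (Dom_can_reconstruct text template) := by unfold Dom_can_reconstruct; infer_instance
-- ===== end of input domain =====

-- B replaces A's merged two-pointer scan by an inverted index (word -> sorted positions)
-- queried by binary search; same return value, a different algorithm of similar cost.

-- ===== PORT A =====
-- A's inner `while text_index < text_length and text_words[text_index] != word`:
-- the index into text_words is represented by the remaining suffix; the while loop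
-- scans that suffix to the first occurrence of `word` ([] = text_index == text_length).
def pvAFind (tw : List String) (w : String) : List String :=
  match tw with
  | [] => []
  | t :: ts => if t ≠ w then pvAFind ts w else t :: ts

-- A's `for word in template_words` loop; `continue` branch first, then scan / return False / advance.
def pvALoop (tpl : List String) (tw : List String) : Bool :=
  match tpl with
  | [] => true
  | w :: rest =>
    if w = "[Dummy]" then pvALoop rest tw
    else
      match pvAFind tw w with
      | [] => false
      | _ :: ts => pvALoop rest ts

def can_reconstruct (text : String) (template : String) : Bool :=
  pvALoop (PySem.Str.split₀ template) (PySem.Str.split₀ text)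

-- ===== PORT B =====
-- `for idx, w in enumerate(text.split()): positions.setdefault(w, []).append(idx)`
-- (the enumerate counter is carried explicitly; append-in-place = re-insert the extended list)
def pvUpd (d : PySem.Dict String (List Nat)) (w : String) (idx : Nat) :
    PySem.Dict String (List Nat) :=
  match d.get? w with
  | none => d.insert w [idx]
  | some l => d.insert w (l ++ [idx])

def pvBuild (ts : List String) (idx : Nat) (d : PySem.Dict String (List Nat)) :
    PySem.Dict String (List Nat) :=
  match ts with
  | [] => d
  | w :: rest => pvBuild rest (idx + 1) (pvUpd d w idx)

-- `while lo < hi: mid = (lo+hi)//2; if occ[mid] < cur: lo = mid+1 else: hi = mid`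
def pvBS (occ : List Nat) (cur lo hi : Nat) : Nat :=
  if lo < hi then
    let mid := (lo + hi) / 2
    if occ.getD mid 0 < cur then pvBS occ cur (mid + 1) hi else pvBS occ cur lo mid
  else lo
termination_by hi - lo
decreasing_by all_goals omega

-- `for w in template.split(): …` with the cursor as state
def pvBMain (d : PySem.Dict String (List Nat)) (tpl : List String) (cur : Nat) : Bool :=
  match tpl with
  | [] => true
  | w :: rest =>
    if w = "[Dummy]" then pvBMain d rest cur
    else
      match d.get? w with
      | none => false
      | some occ =>
        let lo := pvBS occ cur 0 occ.length
        if lo = occ.length then false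
        else pvBMain d rest (occ.getD lo 0 + 1)

def can_reconstruct_alt (text : String) (template : String) : Bool :=
  pvBMain (pvBuild (PySem.Str.split₀ text) 0 PySem.Dict.empty) (PySem.Str.split₀ template) 0

-- ===== PRECONDITION & SPEC =====
def Spec_can_reconstruct (text : String) (template : String) (out : Bool) : Prop := out = can_reconstruct_alt text template
instance (text : String) (template : String) (out : Bool) : Decidable (Spec_can_reconstruct text template out) := by unfold Spec_can_reconstruct; infer_instance

-- ===== CLAIM (what is proved, stated in full; the proofs are below) =====
def Claim_equal_can_reconstruct : Prop := ∀ (text : String) (template : String), Dom_can_reconstruct text template → Spec_can_reconstruct text template (can_reconstruct text template)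

-- ===== LEMMAS AND PROOFS =====

-- the reference subsequence predicate both ports are reduced to
def pvIsSub (ns : List String) (tw : List String) : Bool :=
  match ns, tw with
  | [], _ => true
  | _ :: _, [] => false
  | n :: ns', t :: ts => if t = n then pvIsSub ns' ts else pvIsSub (n :: ns') ts

-- positions of w in ts, numbered from off (the mathematical content of B's index)
def pvIdx (ts : List String) (w : String) (off : Nat) : List Nat :=
  match ts with
  | [] => []
  | t :: ts' => if t = w then off :: pvIdx ts' w (off + 1) else pvIdx ts' w (off + 1)

-- ---- A-side reduction ----
theorem pvIsSub_find (w : String) (ns tw : List String) :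
    pvIsSub (w :: ns) tw = match pvAFind tw w with
      | [] => false
      | _ :: ts => pvIsSub ns ts := by
  induction tw with
  | nil => simp [pvIsSub, pvAFind]
  | cons t ts ih =>
    by_cases h : t = w
    · subst h; simp [pvIsSub, pvAFind]
    · simp [pvIsSub, pvAFind, h, ih]

theorem pvALoop_eq_isSub (tpl tw : List String) :
    pvALoop tpl tw = pvIsSub (tpl.filter (fun w => w ≠ "[Dummy]")) tw := by
  induction tpl generalizing tw with
  | nil => simp [pvALoop, pvIsSub]
  | cons w rest ih =>
    by_cases h : w = "[Dummy]"
    · simp [pvALoop, h, ih]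
    · have hf : (w :: rest).filter (fun x => x ≠ "[Dummy]")
          = w :: rest.filter (fun x => x ≠ "[Dummy]") := by simp [h]
      rw [hf, pvIsSub_find]
      simp only [pvALoop, if_neg h]
      cases pvAFind tw w <;> simp [ih]

-- ---- pvIdx facts ----
theorem pvIdx_ge (ts : List String) (w : String) (off : Nat) :
    ∀ x ∈ pvIdx ts w off, off ≤ x := by
  induction ts generalizing off with
  | nil => simp [pvIdx]
  | cons t ts' ih =>
    intro x hx
    by_cases h : t = w
    · simp only [pvIdx, if_pos h, List.mem_cons] at hx
      rcases hx with rfl | hx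
      · omega
      · have := ih (off + 1) x hx; omega
    · simp only [pvIdx, if_neg h] at hx
      have := ih (off + 1) x hx; omega

theorem pvIdx_sorted (ts : List String) (w : String) (off : Nat) :
    (pvIdx ts w off).Pairwise (· < ·) := by
  induction ts generalizing off with
  | nil => simp [pvIdx]
  | cons t ts' ih =>
    by_cases h : t = w
    · simp only [pvIdx, if_pos h]
      refine List.Pairwise.cons ?_ (ih (off + 1))
      intro x hx; have := pvIdx_ge ts' w (off + 1) x hx; omega
    · simp only [pvIdx, if_neg h]; exact ih (off + 1)

-- dropping below the cursor = re-indexing from the cursor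
theorem pvIdx_dropWhile (ts : List String) (w : String) (off cur : Nat) (h : off ≤ cur) :
    (pvIdx ts w off).dropWhile (fun x => decide (x < cur)) = pvIdx (ts.drop (cur - off)) w cur := by
  induction ts generalizing off with
  | nil => simp [pvIdx]
  | cons t ts' ih =>
    rcases Nat.eq_or_lt_of_le h with rfl | hlt
    · have hall : ∀ x ∈ pvIdx (t :: ts') w off, ¬ (decide (x < off) = true) := by
        intro x hx; have := pvIdx_ge (t :: ts') w off x hx; simp; omega
      rw [List.dropWhile_eq_self_iff.mpr ?_]
      · simp
      · cases hh : pvIdx (t :: ts') w off with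
        | nil => simp
        | cons a l =>
          have : a ∈ pvIdx (t :: ts') w off := by rw [hh]; exact List.mem_cons_self
          simpa using hall a this
    · have h1 : off + 1 ≤ cur := hlt
      have hstep : (pvIdx ts' w (off + 1)).dropWhile (fun x => decide (x < cur))
          = pvIdx (ts'.drop (cur - (off + 1))) w cur := ih (off + 1) h1
      have hdrop : (t :: ts').drop (cur - off) = ts'.drop (cur - (off + 1)) := by
        have : cur - off = (cur - (off + 1)) + 1 := by omega
        simp [this]
      by_cases h' : t = w
      · simp only [pvIdx, if_pos h']
        rw [List.dropWhile_cons]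
        simp only [decide_eq_true_eq]
        rw [if_pos (by omega : off < cur)]
        rw [hstep, hdrop]
      · simp only [pvIdx, if_neg h']
        rw [hstep, hdrop]

-- stepping pvIsSub via the first occurrence (head of pvIdx)
theorem pvIsSub_idx (w : String) (ns : List String) (ts : List String) (c : Nat) :
    pvIsSub (w :: ns) ts = match pvIdx ts w c with
      | [] => false
      | j :: _ => pvIsSub ns (ts.drop (j + 1 - c)) := by
  induction ts generalizing c with
  | nil => simp [pvIsSub, pvIdx]
  | cons t ts' ih =>
    by_cases h : t = w
    · subst h
      simp only [pvIsSub, pvIdx]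
      have : c + 1 - c = 1 := by omega
      simp [this]
    · simp only [pvIsSub, pvIdx, if_neg h]
      rw [ih (c + 1)]
      cases hh : pvIdx ts' w (c + 1) with
      | nil => rfl
      | cons j l =>
        have hj : c + 1 ≤ j := pvIdx_ge ts' w (c + 1) j (by rw [hh]; exact List.mem_cons_self)
        have : j + 1 - c = (j + 1 - (c + 1)) + 1 := by omega
        simp [this]

-- ---- dict build correctness ----
theorem pvUpd_none (d : PySem.Dict String (List Nat)) (w : String) (idx : Nat)
    (hd : d.get? w = none) : pvUpd d w idx = d.insert w [idx] := by
  simp [pvUpd, hd]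

theorem pvUpd_some (d : PySem.Dict String (List Nat)) (w : String) (idx : Nat)
    (l : List Nat) (hd : d.get? w = some l) : pvUpd d w idx = d.insert w (l ++ [idx]) := by
  simp [pvUpd, hd]

theorem pvBuild_get? (ts : List String) (idx : Nat) (d : PySem.Dict String (List Nat)) (w : String) :
    (pvBuild ts idx d).get? w =
      if d.get? w = none ∧ pvIdx ts w idx = [] then none
      else some ((d.get? w).getD [] ++ pvIdx ts w idx) := by
  induction ts generalizing idx d with
  | nil =>
    cases h : d.get? w <;> simp [pvBuild, pvIdx, h]
  | cons t ts' ih =>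
    by_cases h : t = w
    · subst h
      simp only [pvBuild, pvIdx, ih]
      cases hd : d.get? t with
      | none =>
        rw [pvUpd_none d t idx hd, PySem.Dict.get?_insert_self]
        simp
      | some l =>
        rw [pvUpd_some d t idx l hd, PySem.Dict.get?_insert_self]
        simp
    · have hne : w ≠ t := fun hh => h hh.symm
      simp only [pvBuild, pvIdx, if_neg h, ih]
      have hup : (pvUpd d t idx).get? w = d.get? w := by
        cases hd : d.get? t with
        | none => rw [pvUpd_none d t idx hd]; exact PySem.Dict.get?_insert_of_ne _ _ hne
        | some l => rw [pvUpd_some d t idx l hd]; exact PySem.Dict.get?_insert_of_ne _ _ hne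
      rw [hup]

theorem pvBuildPos_get? (ts : List String) (w : String) :
    (pvBuild ts 0 PySem.Dict.empty).get? w =
      if pvIdx ts w 0 = [] then none else some (pvIdx ts w 0) := by
  rw [pvBuild_get?]
  simp [PySem.Dict.get?_empty]

-- ---- binary search ----
theorem pvBS_spec (l : List Nat) (cur : Nat)
    (hmono : ∀ i j, i ≤ j → j < l.length → l.getD i 0 ≤ l.getD j 0) :
    ∀ lo hi, lo ≤ hi → hi ≤ l.length →
    (∀ k, k < lo → l.getD k 0 < cur) →
    (∀ k, hi ≤ k → k < l.length → cur ≤ l.getD k 0) →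
    (pvBS l cur lo hi ≤ l.length ∧
     (∀ k, k < pvBS l cur lo hi → l.getD k 0 < cur) ∧
     (∀ k, pvBS l cur lo hi ≤ k → k < l.length → cur ≤ l.getD k 0)) := by
  intro lo hi
  induction hn : hi - lo using Nat.strong_induction_on generalizing lo hi with
  | _ n ih =>
    intro hlohi hhile hlo hhi
    by_cases hlt : lo < hi
    · rw [pvBS, if_pos hlt]
      set mid := (lo + hi) / 2 with hmid
      have hmlt : mid < hi := by omega
      have hmge : lo ≤ mid := by omega
      by_cases hc : l.getD mid 0 < cur
      · rw [if_pos hc]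
        refine ih (hi - (mid + 1)) (by omega) (mid + 1) hi rfl (by omega) hhile ?_ hhi
        intro k hk
        by_cases hk2 : k < lo
        · exact hlo k hk2
        · exact lt_of_le_of_lt (hmono k mid (by omega) (by omega)) hc
      · rw [if_neg hc]
        refine ih (mid - lo) (by omega) lo mid rfl hmge (by omega) hlo ?_
        intro k hk hk2
        exact le_trans (le_of_not_gt hc) (hmono mid k hk hk2)
    · rw [pvBS, if_neg hlt]
      have : lo = hi := by omega
      subst this
      exact ⟨hhile, hlo, hhi⟩

-- dropping the result of a "first index not satisfying p" is dropWhile p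
theorem pvDrop_eq_dropWhile (l : List Nat) (p : Nat → Bool) :
    ∀ r, r ≤ l.length → (∀ k, k < r → p (l.getD k 0) = true) →
    (r < l.length → p (l.getD r 0) = false) →
    l.drop r = l.dropWhile p := by
  induction l with
  | nil => intro r h _ _; simp
  | cons x xs ih =>
    intro r hr h1 h2
    cases r with
    | zero =>
      have := h2 (by simp)
      simp only [List.getD_cons_zero] at this
      simp [this]
    | succ r' =>
      have hx : p x = true := by simpa using h1 0 (by omega)
      rw [List.drop_succ_cons, List.dropWhile_cons, if_pos hx]
      refine ih r' (by simpa using hr) ?_ ?_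
      · intro k hk; simpa using h1 (k + 1) (by omega)
      · intro hlt; simpa using h2 (by simpa using hlt)

theorem pvSorted_mono (l : List Nat) (h : l.Pairwise (· < ·)) :
    ∀ i j, i ≤ j → j < l.length → l.getD i 0 ≤ l.getD j 0 := by
  intro i j hij hj
  rcases Nat.eq_or_lt_of_le hij with rfl | hlt
  · exact le_refl _
  · have := (List.pairwise_iff_getElem.mp h) i j (by omega) hj hlt
    rw [l.getD_eq_getElem 0 (by omega), l.getD_eq_getElem 0 hj]
    exact le_of_lt this

-- B's query step: the suffix of occ from the binary-search result is the dropWhile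
theorem pvBS_drop (l : List Nat) (cur : Nat) (hs : l.Pairwise (· < ·)) :
    l.drop (pvBS l cur 0 l.length) = l.dropWhile (fun x => decide (x < cur)) ∧
    pvBS l cur 0 l.length ≤ l.length := by
  obtain ⟨hle, h1, h2⟩ := pvBS_spec l cur (pvSorted_mono l hs) 0 l.length
    (by omega) (le_refl _) (by omega) (by omega)
  refine ⟨pvDrop_eq_dropWhile l _ _ hle ?_ ?_, hle⟩
  · intro k hk; simpa using h1 k hk
  · intro hlt; simpa using h2 _ (le_refl _) hlt

-- ---- B-side main reduction ----
theorem pvBMain_eq_isSub (words : List String) (tpl : List String) (cur : Nat) :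
    pvBMain (pvBuild words 0 PySem.Dict.empty) tpl cur
      = pvIsSub (tpl.filter (fun w => w ≠ "[Dummy]")) (words.drop cur) := by
  induction tpl generalizing cur with
  | nil => simp [pvBMain, pvIsSub]
  | cons w rest ih =>
    by_cases h : w = "[Dummy]"
    · simp [pvBMain, h, ih]
    · have hf : (w :: rest).filter (fun x => x ≠ "[Dummy]")
          = w :: rest.filter (fun x => x ≠ "[Dummy]") := by simp [h]
      rw [hf]
      simp only [pvBMain, if_neg h]
      rw [pvBuildPos_get?]
      have hstep := pvIsSub_idx w (rest.filter (fun x => x ≠ "[Dummy]")) (words.drop cur) cur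
      have hdw : (pvIdx words w 0).dropWhile (fun x => decide (x < cur))
          = pvIdx (words.drop cur) w cur := by
        simpa using pvIdx_dropWhile words w 0 cur (by omega)
      by_cases hempty : pvIdx words w 0 = []
      · rw [if_pos hempty]
        have : pvIdx (words.drop cur) w cur = [] := by
          rw [← hdw, hempty]; simp
        rw [hstep, this]
      · rw [if_neg hempty]
        simp only []
        set occ := pvIdx words w 0 with hocc
        obtain ⟨hdropbs, hbsle⟩ := pvBS_drop occ cur (pvIdx_sorted words w 0)
        set lo := pvBS occ cur 0 occ.length with hlo
        by_cases hend : lo = occ.length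
        · rw [if_pos hend]
          have : pvIdx (words.drop cur) w cur = [] := by
            rw [← hdw, ← hdropbs, hend]; simp
          rw [hstep, this]
        · rw [if_neg hend]
          have hlolt : lo < occ.length := by omega
          have hdropsome : occ.drop lo = occ.getD lo 0 :: occ.drop (lo + 1) := by
            rw [occ.getD_eq_getElem 0 hlolt]
            exact List.drop_eq_getElem_cons hlolt
          have hidx : pvIdx (words.drop cur) w cur = occ.getD lo 0 :: occ.drop (lo + 1) := by
            rw [← hdw, ← hdropbs, hdropsome]
          set j := occ.getD lo 0 with hj
          have hjcur : cur ≤ j := pvIdx_ge (words.drop cur) w cur j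
            (by rw [hidx]; exact List.mem_cons_self)
          rw [hstep, hidx]
          simp only []
          have hdd : (words.drop cur).drop (j + 1 - cur) = words.drop (j + 1) := by
            rw [List.drop_drop]
            congr 1
            omega
          rw [hdd, ih (j + 1)]

-- ===== VERDICT (by name: the statement is the Claim_ definition above) =====
theorem can_reconstruct_spec : Claim_equal_can_reconstruct := by
  intro text template _
  unfold Spec_can_reconstruct can_reconstruct can_reconstruct_alt
  rw [pvALoop_eq_isSub, pvBMain_eq_isSub]
  simp
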